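-- pv_equiv track=rewrite | github.com/Parad0x13/ProjectEuler | Solutions/Euler/Math.py | Farey
-- ===== SOURCE A (Python) =====
-- def Farey(N, a = (0, 1), b = (1, 1)):
--     retVal = [a, b]
--     for N in range(N):
--         tmp = [retVal[0]]
--         for n in range(len(retVal) - 1):
--             a = retVal[n + 0]
--             b = retVal[n + 1]
--             c = tuple(map(sum, zip(a, b)))
--             tmp.append(c)
--             tmp.append(b)
--         retVal = tmp
--     return retVal
-- ===== SOURCE B (Python) =====
-- def Farey(N, a=(0, 1), b=(1, 1)):
--     def rec(a, b, depth):
--         if depth <= 0: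
--             return [a, b]
--         m = tuple(map(sum, zip(a, b)))
--         return rec(a, m, depth - 1) + rec(m, b, depth - 1)[1:]
--     return rec(a, b, N)
-- ===== Notes on version B (the rewrite author's own statement) =====
-- stated objective: alternative
-- what changed: Replaces the N-pass iterative rebuild of each full mediant level (indexing adjacent pairs of the previous level) with a divide-and-conquer recursion over sub-intervals of the Stern-Brocot tree, splicing the two half-results on the shared mediant.
import Mathlib
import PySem

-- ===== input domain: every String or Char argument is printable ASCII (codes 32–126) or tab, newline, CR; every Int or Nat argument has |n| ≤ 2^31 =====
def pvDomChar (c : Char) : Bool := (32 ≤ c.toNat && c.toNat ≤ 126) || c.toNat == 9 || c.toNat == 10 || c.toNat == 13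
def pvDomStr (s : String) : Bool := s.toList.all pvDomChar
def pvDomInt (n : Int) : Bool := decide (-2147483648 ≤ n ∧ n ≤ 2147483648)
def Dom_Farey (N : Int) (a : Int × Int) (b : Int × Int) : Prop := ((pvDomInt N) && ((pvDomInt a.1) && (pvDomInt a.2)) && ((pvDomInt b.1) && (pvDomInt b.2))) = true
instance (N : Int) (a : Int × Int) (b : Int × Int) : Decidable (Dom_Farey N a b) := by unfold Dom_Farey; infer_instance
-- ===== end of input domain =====

-- B replaces A's N-pass level-by-level rebuild with divide-and-conquer recursion over mediant sub-intervals (objective: alternative, same cost).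

-- ===== PORT A =====
-- literal port of A: retVal starts [a, b]; N passes, each rebuilding the whole level
-- from adjacent pairs; tuple(map(sum, zip(a, b))) on pairs is (a.1+b.1, a.2+b.2).
def Farey (N : Int) (a : Int × Int) (b : Int × Int) : List (Int × Int) :=
  (PySem.List.pyRange 0 N 1).foldl
    (fun retVal _ =>
      (PySem.List.pyRange 0 (PySem.List.len retVal - 1) 1).foldl
        (fun tmp n =>
          let a := PySem.List.pyGetD retVal (n + 0) (0, 0)
          let b := PySem.List.pyGetD retVal (n + 1) (0, 0)
          let c := (a.1 + b.1, a.2 + b.2)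
          (tmp ++ [c]) ++ [b])
        [PySem.List.pyGetD retVal 0 (0, 0)])
    [a, b]

-- ===== PORT B =====
-- literal port of B's inner rec: base at depth <= 0, else recurse on the two
-- sub-intervals around the mediant and splice with [1:] (= List.tail).
def FareyRec (a : Int × Int) (b : Int × Int) (depth : Int) : List (Int × Int) :=
  if _h : depth ≤ 0 then [a, b]
  else
    let m := (a.1 + b.1, a.2 + b.2)
    FareyRec a m (depth - 1) ++ (FareyRec m b (depth - 1)).tail
termination_by depth.toNat
decreasing_by all_goals omega

def Farey_alt (N : Int) (a : Int × Int) (b : Int × Int) : List (Int × Int) :=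
  FareyRec a b N

-- ===== PRECONDITION & SPEC =====
def Spec_Farey (N : Int) (a : Int × Int) (b : Int × Int) (out : List (Int × Int)) : Prop := out = Farey_alt N a b
instance (N : Int) (a : Int × Int) (b : Int × Int) (out : List (Int × Int)) : Decidable (Spec_Farey N a b out) := by unfold Spec_Farey; infer_instance

-- ===== CLAIM (what is proved, stated in full; the proofs are below) =====
def Claim_equal_Farey : Prop := ∀ (N : Int) (a : Int × Int) (b : Int × Int), Dom_Farey N a b → Spec_Farey N a b (Farey N a b)

-- ===== LEMMAS AND PROOFS =====

-- mediant
def pvMed (a b : Int × Int) : Int × Int := (a.1 + b.1, a.2 + b.2)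

-- `go x l` inserts a mediant before every element of l, threading the previous element
def pvGo (x : Int × Int) : List (Int × Int) → List (Int × Int)
  | [] => []
  | y :: l => pvMed x y :: y :: pvGo y l

-- Nat-depth version of B's recursion
def pvRecN (a b : Int × Int) : Nat → List (Int × Int)
  | 0 => [a, b]
  | n + 1 => pvRecN a (pvMed a b) n ++ (pvRecN (pvMed a b) b n).tail

lemma fareyRec_eq_recN : ∀ (n : Nat) (d : Int), d.toNat = n →
    ∀ (a b : Int × Int), FareyRec a b d = pvRecN a b n := by
  intro n
  induction n with
  | zero =>
    intro d hd a b
    rw [FareyRec]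
    simp only [pvRecN]
    rw [dif_pos (by omega)]
  | succ n ih =>
    intro d hd a b
    rw [FareyRec]
    rw [dif_neg (by omega)]
    simp only [pvRecN]
    rw [ih (d - 1) (by omega), ih (d - 1) (by omega)]
    simp [pvMed]

lemma recN_cons (n : Nat) (a b : Int × Int) : pvRecN a b n = a :: (pvRecN a b n).tail := by
  cases n with
  | zero => rfl
  | succ n =>
    simp only [pvRecN]
    rw [recN_cons n a (pvMed a b)]
    rfl

lemma recN_length (n : Nat) (a b : Int × Int) : 2 ≤ (pvRecN a b n).length := by
  induction n generalizing a b with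
  | zero => simp [pvRecN]
  | succ n ih =>
    simp only [pvRecN, List.length_append, List.length_tail]
    have h1 := ih a (pvMed a b)
    have h2 := ih (pvMed a b) b
    omega

lemma getLastD_ne_nil {α : Type} (w : List α) (h : w ≠ []) (x y : α) :
    w.getLastD x = w.getLastD y := by
  cases w with
  | nil => exact absurd rfl h
  | cons a l => rfl

lemma getLastD_append_ne {α : Type} (u w : List α) (h : w ≠ []) :
    ∀ x, (u ++ w).getLastD x = w.getLastD x := by
  induction u with
  | nil => intro x; rfl
  | cons y u' ih =>
    intro x
    rw [List.cons_append, List.getLastD_cons, ih y, getLastD_ne_nil w h y x]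

lemma recN_getLastD (n : Nat) (a b : Int × Int) : ∀ x, (pvRecN a b n).getLastD x = b := by
  induction n generalizing a b with
  | zero => intro x; rfl
  | succ n ih =>
    intro x
    have h2 := recN_length n (pvMed a b) b
    have htl : (pvRecN (pvMed a b) b n).tail ≠ [] := by
      intro hc
      have := congrArg List.length hc
      simp [List.length_tail] at this
      omega
    simp only [pvRecN]
    rw [getLastD_append_ne _ _ htl]
    have h := ih (pvMed a b) b x
    rw [recN_cons n (pvMed a b) b, List.getLastD_cons] at h
    rw [getLastD_ne_nil _ htl x (pvMed a b)]
    exact h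

lemma go_append (u w : List (Int × Int)) : ∀ x, pvGo x (u ++ w) = pvGo x u ++ pvGo (u.getLastD x) w := by
  induction u with
  | nil => intro x; rfl
  | cons y r ih =>
    intro x
    simp only [List.cons_append, pvGo, ih y, List.getLastD_cons]

-- the flatMap-over-indices form of A's inner loop equals pvGo
lemma flatMap_range_eq_go : ∀ (w : List (Int × Int)) (p : Int × Int),
    (List.range w.length).flatMap
      (fun k => [pvMed (List.getD (p :: w) k (0,0)) (List.getD w k (0,0)), List.getD w k (0,0)])
    = pvGo p w := by
  intro w
  induction w with
  | nil => intro p; rfl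
  | cons q r ih =>
    intro p
    rw [List.length_cons, List.range_succ_eq_map, List.flatMap_cons, List.flatMap_map]
    simp only [List.getD_cons_zero, List.getD_cons_succ]
    rw [ih q]
    rfl

-- one pass of A's inner loop on a nonempty level p :: w computes p :: pvGo p w
lemma inner_loop_eq (p : Int × Int) (w : List (Int × Int)) :
    (PySem.List.pyRange 0 (PySem.List.len (p :: w) - 1) 1).foldl
      (fun tmp n =>
        let a := PySem.List.pyGetD (p :: w) (n + 0) (0, 0)
        let b := PySem.List.pyGetD (p :: w) (n + 1) (0, 0)
        let c := (a.1 + b.1, a.2 + b.2)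
        (tmp ++ [c]) ++ [b])
      [PySem.List.pyGetD (p :: w) 0 (0, 0)]
    = p :: pvGo p w := by
  have hlen : PySem.List.len (p :: w) - 1 = (w.length : Int) := by
    simp [PySem.List.len_eq]
  rw [hlen]
  have hbody : ∀ (tmp : List (Int × Int)) (n : Int),
      (let a := PySem.List.pyGetD (p :: w) (n + 0) (0, 0)
       let b := PySem.List.pyGetD (p :: w) (n + 1) (0, 0)
       let c := (a.1 + b.1, a.2 + b.2)
       (tmp ++ [c]) ++ [b])
      = tmp ++ [pvMed (PySem.List.pyGetD (p :: w) (n + 0) (0, 0)) (PySem.List.pyGetD (p :: w) (n + 1) (0, 0)),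
                PySem.List.pyGetD (p :: w) (n + 1) (0, 0)] := by
    intro tmp n; simp [pvMed]
  calc (PySem.List.pyRange 0 (w.length : Int) 1).foldl
        (fun tmp n =>
          let a := PySem.List.pyGetD (p :: w) (n + 0) (0, 0)
          let b := PySem.List.pyGetD (p :: w) (n + 1) (0, 0)
          let c := (a.1 + b.1, a.2 + b.2)
          (tmp ++ [c]) ++ [b])
        [PySem.List.pyGetD (p :: w) 0 (0, 0)]
      = (PySem.List.pyRange 0 (w.length : Int) 1).foldl
        (fun tmp n => tmp ++ [pvMed (PySem.List.pyGetD (p :: w) (n + 0) (0, 0)) (PySem.List.pyGetD (p :: w) (n + 1) (0, 0)),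
                              PySem.List.pyGetD (p :: w) (n + 1) (0, 0)])
        [PySem.List.pyGetD (p :: w) 0 (0, 0)] := by
        apply PySem.List.foldl_congr_mem
        intro acc x hx
        exact hbody acc x
    _ = [PySem.List.pyGetD (p :: w) 0 (0, 0)] ++
        (PySem.List.pyRange 0 (w.length : Int) 1).flatMap
          (fun n => [pvMed (PySem.List.pyGetD (p :: w) (n + 0) (0, 0)) (PySem.List.pyGetD (p :: w) (n + 1) (0, 0)),
                     PySem.List.pyGetD (p :: w) (n + 1) (0, 0)]) := by
        exact PySem.List.foldl_append_eq_flatMap _ _ _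
    _ = p :: pvGo p w := by
        rw [PySem.List.pyRange_one]
        have hn : ((w.length : Int) - 0).toNat = w.length := by omega
        rw [hn, List.flatMap_map]
        have hcongr : (List.range w.length).flatMap
            (fun a : Nat => [pvMed (PySem.List.pyGetD (p :: w) (0 + (a : Int) + 0) (0, 0)) (PySem.List.pyGetD (p :: w) (0 + (a : Int) + 1) (0, 0)),
                        PySem.List.pyGetD (p :: w) (0 + (a : Int) + 1) (0, 0)])
            = (List.range w.length).flatMap
            (fun k => [pvMed (List.getD (p :: w) k (0,0)) (List.getD w k (0,0)), List.getD w k (0,0)]) := by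
          apply List.flatMap_congr
          intro k _
          have h0 : (0 : Int) + (k : Int) + 0 = (k : Int) := by omega
          have h1 : (0 : Int) + (k : Int) + 1 = ((k + 1 : Nat) : Int) := by push_cast; omega
          simp only [h0, h1, PySem.List.pyGetD_natCast, List.getD_cons_succ]
        rw [hcongr, flatMap_range_eq_go]
        simp [PySem.List.pyGetD_zero_cons]

-- one pass of A's inner loop advances pvRecN by one level
lemma go_recN (n : Nat) (a b : Int × Int) :
    a :: pvGo a (pvRecN a b n).tail = pvRecN a b (n + 1) := by
  induction n generalizing a b with
  | zero => simp [pvRecN, pvGo, pvMed]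
  | succ n ih =>
    have hu := recN_cons n a (pvMed a b)
    have hlast : (pvRecN a (pvMed a b) n).tail.getLastD a = pvMed a b := by
      have h := recN_getLastD n a (pvMed a b) a
      rw [recN_cons n a (pvMed a b), List.getLastD_cons] at h
      exact h
    calc a :: pvGo a (pvRecN a b (n + 1)).tail
        = a :: pvGo a ((pvRecN a (pvMed a b) n).tail ++ (pvRecN (pvMed a b) b n).tail) := by
          have hLtail : (pvRecN a b (n + 1)).tail
              = (pvRecN a (pvMed a b) n).tail ++ (pvRecN (pvMed a b) b n).tail := by
            show (pvRecN a (pvMed a b) n ++ (pvRecN (pvMed a b) b n).tail).tail = _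
            rw [hu]
            rfl
          rw [hLtail]
      _ = a :: (pvGo a (pvRecN a (pvMed a b) n).tail ++ pvGo (pvMed a b) (pvRecN (pvMed a b) b n).tail) := by
          rw [go_append, hlast]
      _ = (a :: pvGo a (pvRecN a (pvMed a b) n).tail) ++ pvGo (pvMed a b) (pvRecN (pvMed a b) b n).tail := rfl
      _ = pvRecN a (pvMed a b) (n + 1) ++ (pvRecN (pvMed a b) b (n + 1)).tail := by
          rw [ih a (pvMed a b)]
          congr 1
          rw [← ih (pvMed a b) b, List.tail_cons]
      _ = pvRecN a b (n + 1 + 1) := rfl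

-- the outer loop ignores its loop variable: foldl = iterate (length) times
lemma foldl_const_iterate {α β : Type} (F : α → α) (l : List β) :
    ∀ init, l.foldl (fun r _ => F r) init = F^[l.length] init := by
  induction l with
  | nil => intro init; rfl
  | cons x xs ih =>
    intro init
    simp only [List.foldl_cons, List.length_cons, ih, Function.iterate_succ_apply]

-- the full iterative build equals pvRecN
lemma iterate_eq_recN (F : List (Int × Int) → List (Int × Int))
    (hF : ∀ p w, F (p :: w) = p :: pvGo p w) :
    ∀ (n : Nat) (a b : Int × Int), F^[n] [a, b] = pvRecN a b n := by
  intro n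
  induction n with
  | zero => intro a b; rfl
  | succ n ih =>
    intro a b
    rw [Function.iterate_succ_apply']
    rw [ih a b]
    rw [recN_cons n a b, hF]
    exact go_recN n a b

-- ===== VERDICT (by name: the statement is the Claim_ definition above) =====
theorem Farey_spec : Claim_equal_Farey := by
  intro N a b _
  unfold Spec_Farey Farey Farey_alt
  rw [foldl_const_iterate, PySem.List.length_pyRange_one]
  rw [fareyRec_eq_recN ((N - 0).toNat) N (by omega)]
  exact iterate_eq_recN _ (fun p w => inner_loop_eq p w) _ a b
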